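-- pv_equiv track=rewrite | github.com/jason-jj-li/skills | vibe-research/legacy/scripts/build_writing_outline.py | derive_reporting_constraints
-- ===== SOURCE A (Python) =====
-- from typing import Dict, List, Tuple
--
-- TOP_TIER_QUALITY_BAR = "top_tier_submission"
--
-- SUBMISSION_QUALITY_BARS = {"submission", TOP_TIER_QUALITY_BAR}
--
-- def derive_reporting_constraints(summary: Dict, target_journal: str, selected_mode: str, quality_bar: str) -> List[str]:
--     signals = summary.get("signal_counts", {})
--     out: List[str] = []
--     quality = (quality_bar or "").strip().lower()
--
--     if quality in SUBMISSION_QUALITY_BARS: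
--         out.append("Write all core sections in full paragraphs; avoid bulletized prose in abstract, introduction, results, and discussion.")
--         out.append("Use claim-evidence-implication paragraph flow with quantitative anchors in interpretive sections.")
--     if quality == TOP_TIER_QUALITY_BAR:
--         out.append("Avoid template-like repetitive openings; vary sentence starters and transitions across adjacent paragraphs.")
--     if str(target_journal).strip():
--         out.append(f"Verify heading structure and declarations against current author instructions for {target_journal}.")
--
--     if signals.get("registration_or_prospero", 0) > 0:
--         out.append("State protocol/registration details and deviations in Methods.")
--     if signals.get("random_effects", 0) > 0:
--         out.append("Specify synthesis model and justify random-effects assumptions.")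
--     if signals.get("heterogeneity_i2", 0) > 0:
--         out.append("Report heterogeneity (I2/tau2/Q) and sensitivity analyses.")
--     if signals.get("publication_bias_or_funnel", 0) > 0:
--         out.append("Report publication bias assessment (funnel plot/small-study effects) where applicable.")
--     if signals.get("risk_of_bias_tool", 0) > 0:
--         out.append("Report study-level risk-of-bias method and results with a dedicated subsection.")
--     if signals.get("grade_or_certainty", 0) > 0:
--         out.append("Report certainty of evidence grading and link to primary outcomes.")
--     if signals.get("funding_statement", 0) > 0 or quality in SUBMISSION_QUALITY_BARS:
--         out.append("Include funding statement and role-of-funder declaration.")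
--
--     if selected_mode == "meta_analysis":
--         out.append("Provide effect-size harmonization and prespecified subgroup analyses.")
--     elif selected_mode == "systematic_review_no_meta":
--         out.append("Use structured qualitative synthesis and justify why pooling is inappropriate.")
--     elif selected_mode == "scoping_review":
--         out.append("Focus on evidence mapping logic and transparent charting framework.")
--
--     if not out:
--         out.append("Follow a structured IMRaD narrative with explicit methods-to-claims traceability.")
--     deduped: List[str] = []
--     for item in out:
--         if item not in deduped:
--             deduped.append(item)
--     return deduped
-- ===== SOURCE B (Python) =====
-- TOP_TIER_QUALITY_BAR = "top_tier_submission"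
-- SUBMISSION_QUALITY_BARS = {"submission", TOP_TIER_QUALITY_BAR}
--
-- _SIGNAL_MESSAGES = [
--     ("registration_or_prospero", "State protocol/registration details and deviations in Methods."),
--     ("random_effects", "Specify synthesis model and justify random-effects assumptions."),
--     ("heterogeneity_i2", "Report heterogeneity (I2/tau2/Q) and sensitivity analyses."),
--     ("publication_bias_or_funnel", "Report publication bias assessment (funnel plot/small-study effects) where applicable."),
--     ("risk_of_bias_tool", "Report study-level risk-of-bias method and results with a dedicated subsection."),
--     ("grade_or_certainty", "Report certainty of evidence grading and link to primary outcomes."),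
-- ]
--
-- _MODE_MESSAGES = {
--     "meta_analysis": "Provide effect-size harmonization and prespecified subgroup analyses.",
--     "systematic_review_no_meta": "Use structured qualitative synthesis and justify why pooling is inappropriate.",
--     "scoping_review": "Focus on evidence mapping logic and transparent charting framework.",
-- }
--
-- _FALLBACK = "Follow a structured IMRaD narrative with explicit methods-to-claims traceability."
--
--
-- def _quality_section(quality):
--     section = []
--     if quality in SUBMISSION_QUALITY_BARS:
--         section.append("Write all core sections in full paragraphs; avoid bulletized prose in abstract, introduction, results, and discussion.")
--         section.append("Use claim-evidence-implication paragraph flow with quantitative anchors in interpretive sections.")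
--     if quality == TOP_TIER_QUALITY_BAR:
--         section.append("Avoid template-like repetitive openings; vary sentence starters and transitions across adjacent paragraphs.")
--     return section
--
--
-- def _journal_section(target_journal):
--     if str(target_journal).strip():
--         return [f"Verify heading structure and declarations against current author instructions for {target_journal}."]
--     return []
--
--
-- def _signal_section(positive, is_submission):
--     section = [msg for key, msg in _SIGNAL_MESSAGES if key in positive]
--     if "funding_statement" in positive or is_submission:
--         section.append("Include funding statement and role-of-funder declaration.")
--     return section
--
--
-- def _mode_section(selected_mode):
--     msg = _MODE_MESSAGES.get(selected_mode)
--     return [msg] if msg is not None else []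
--
--
-- def derive_reporting_constraints(summary, target_journal, selected_mode, quality_bar):
--     signals = summary.get("signal_counts", {})
--     quality = (quality_bar or "").strip().lower()
--     positive = {k for k in signals if signals[k] > 0}
--     out = (_quality_section(quality)
--            + _journal_section(target_journal)
--            + _signal_section(positive, quality in SUBMISSION_QUALITY_BARS)
--            + _mode_section(selected_mode))
--     # every candidate message is pairwise distinct, so no dedup pass is needed
--     return out or [_FALLBACK]
-- ===== Notes on version B (the rewrite author's own statement) =====
-- stated objective: simpler
-- what changed: B splits the function into four independent section helpers (quality, journal, signals, mode) concatenated in order, replaces the seven separate signals.get(...) checks with one comprehension over the dict building a set of positive keys, looks the mode message up in a table, and drops A's final dedup pass entirely (the candidate messages are pairwise distinct, which the Lean proof establishes via a Nodup/sublist argument).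
import Mathlib
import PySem

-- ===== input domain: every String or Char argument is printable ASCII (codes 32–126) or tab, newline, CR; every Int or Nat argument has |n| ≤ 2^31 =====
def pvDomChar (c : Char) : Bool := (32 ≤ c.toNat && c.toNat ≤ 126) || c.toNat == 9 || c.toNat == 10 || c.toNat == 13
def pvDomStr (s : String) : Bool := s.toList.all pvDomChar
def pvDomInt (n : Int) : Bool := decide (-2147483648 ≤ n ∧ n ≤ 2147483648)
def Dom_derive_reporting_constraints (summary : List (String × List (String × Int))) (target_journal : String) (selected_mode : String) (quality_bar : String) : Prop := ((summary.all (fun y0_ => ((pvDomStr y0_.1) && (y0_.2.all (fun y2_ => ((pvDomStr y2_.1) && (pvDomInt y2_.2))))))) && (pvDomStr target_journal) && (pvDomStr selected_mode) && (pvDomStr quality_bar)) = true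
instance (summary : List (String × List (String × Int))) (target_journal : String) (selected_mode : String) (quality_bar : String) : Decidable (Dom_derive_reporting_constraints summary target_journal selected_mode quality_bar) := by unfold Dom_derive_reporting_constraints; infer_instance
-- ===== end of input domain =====

-- B decomposes the function into four independent section helpers concatenated in order, scans the
-- signals dict once into a set of positive keys instead of seven separate lookups, looks the mode
-- message up in a table, and omits A's dedup pass (the candidate messages are pairwise distinct,
-- which the proof establishes); objective: simpler, same cost.


-- ===== PORT A =====
-- one 'if cond: out.append(...)' step of A (cond as the Bool Python tests)
def pvAppendIf (c : Bool) (l s : List String) : List String :=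
  if c then l ++ s else l

def derive_reporting_constraints (summary : List (String × List (String × Int))) (target_journal : String) (selected_mode : String) (quality_bar : String) : List String :=
  let signals : List (String × Int) := PySem.Dict.getD (PySem.Dict.mk summary) "signal_counts" []
  let out : List String := []
  let quality := PySem.Str.lower (PySem.Str.strip quality_bar)   -- (quality_bar or "") = quality_bar on strings
  let inBars : Bool := PySem.Set.contains (PySem.Set.ofList ["submission", "top_tier_submission"]) quality
  let out := pvAppendIf inBars out ["Write all core sections in full paragraphs; avoid bulletized prose in abstract, introduction, results, and discussion."]
  let out := pvAppendIf inBars out ["Use claim-evidence-implication paragraph flow with quantitative anchors in interpretive sections."]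
  let out := pvAppendIf (quality == "top_tier_submission") out ["Avoid template-like repetitive openings; vary sentence starters and transitions across adjacent paragraphs."]
  let out := pvAppendIf (PySem.Str.strip target_journal != "") out ["Verify heading structure and declarations against current author instructions for " ++ target_journal ++ "."]
  let out := pvAppendIf (decide (0 < PySem.Dict.getD (PySem.Dict.mk signals) "registration_or_prospero" 0)) out ["State protocol/registration details and deviations in Methods."]
  let out := pvAppendIf (decide (0 < PySem.Dict.getD (PySem.Dict.mk signals) "random_effects" 0)) out ["Specify synthesis model and justify random-effects assumptions."]
  let out := pvAppendIf (decide (0 < PySem.Dict.getD (PySem.Dict.mk signals) "heterogeneity_i2" 0)) out ["Report heterogeneity (I2/tau2/Q) and sensitivity analyses."]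
  let out := pvAppendIf (decide (0 < PySem.Dict.getD (PySem.Dict.mk signals) "publication_bias_or_funnel" 0)) out ["Report publication bias assessment (funnel plot/small-study effects) where applicable."]
  let out := pvAppendIf (decide (0 < PySem.Dict.getD (PySem.Dict.mk signals) "risk_of_bias_tool" 0)) out ["Report study-level risk-of-bias method and results with a dedicated subsection."]
  let out := pvAppendIf (decide (0 < PySem.Dict.getD (PySem.Dict.mk signals) "grade_or_certainty" 0)) out ["Report certainty of evidence grading and link to primary outcomes."]
  let out := pvAppendIf (decide (0 < PySem.Dict.getD (PySem.Dict.mk signals) "funding_statement" 0) || inBars) out ["Include funding statement and role-of-funder declaration."]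
  let out := if selected_mode == "meta_analysis" then
      out ++ ["Provide effect-size harmonization and prespecified subgroup analyses."]
    else if selected_mode == "systematic_review_no_meta" then
      out ++ ["Use structured qualitative synthesis and justify why pooling is inappropriate."]
    else if selected_mode == "scoping_review" then
      out ++ ["Focus on evidence mapping logic and transparent charting framework."]
    else out
  let out := if out = [] then
      out ++ ["Follow a structured IMRaD narrative with explicit methods-to-claims traceability."] else out
  out.foldl (fun deduped item => if item ∈ deduped then deduped else deduped ++ [item]) []

-- ===== PORT B =====
def pvSignalMessages : List (String × String) :=
  [("registration_or_prospero", "State protocol/registration details and deviations in Methods."),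
   ("random_effects", "Specify synthesis model and justify random-effects assumptions."),
   ("heterogeneity_i2", "Report heterogeneity (I2/tau2/Q) and sensitivity analyses."),
   ("publication_bias_or_funnel", "Report publication bias assessment (funnel plot/small-study effects) where applicable."),
   ("risk_of_bias_tool", "Report study-level risk-of-bias method and results with a dedicated subsection."),
   ("grade_or_certainty", "Report certainty of evidence grading and link to primary outcomes.")]

def pvModeMessages : List (String × String) :=
  [("meta_analysis", "Provide effect-size harmonization and prespecified subgroup analyses."),
   ("systematic_review_no_meta", "Use structured qualitative synthesis and justify why pooling is inappropriate."),
   ("scoping_review", "Focus on evidence mapping logic and transparent charting framework.")]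

-- {k for k in signals if signals[k] > 0}: the dict's keys (first-occurrence order), filtered by value
def pvPositiveSignals (signals : List (String × Int)) : PySem.Set String :=
  PySem.Set.ofList ((PySem.List.dedup (signals.map Prod.fst)).filter
    (fun k => decide (0 < PySem.Dict.getD (PySem.Dict.mk signals) k 0)))

def pvQualitySection (quality : String) : List String :=
  (if PySem.Set.contains (PySem.Set.ofList ["submission", "top_tier_submission"]) quality then
     ["Write all core sections in full paragraphs; avoid bulletized prose in abstract, introduction, results, and discussion.",
      "Use claim-evidence-implication paragraph flow with quantitative anchors in interpretive sections."]
   else [])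
  ++ (if quality == "top_tier_submission" then
        ["Avoid template-like repetitive openings; vary sentence starters and transitions across adjacent paragraphs."]
      else [])

def pvJournalSection (target_journal : String) : List String :=
  if PySem.Str.strip target_journal != "" then
    ["Verify heading structure and declarations against current author instructions for " ++ target_journal ++ "."]
  else []

def pvSignalSection (positive : PySem.Set String) (isSubmission : Bool) : List String :=
  ((pvSignalMessages.filter (fun km => PySem.Set.contains positive km.1)).map Prod.snd)
  ++ (if PySem.Set.contains positive "funding_statement" || isSubmission then
        ["Include funding statement and role-of-funder declaration."]
      else [])

def pvModeSection (selected_mode : String) : List String :=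
  match PySem.Dict.get? (PySem.Dict.mk pvModeMessages) selected_mode with
  | some msg => [msg]
  | none => []

def derive_reporting_constraints_alt (summary : List (String × List (String × Int))) (target_journal : String) (selected_mode : String) (quality_bar : String) : List String :=
  let signals : List (String × Int) := PySem.Dict.getD (PySem.Dict.mk summary) "signal_counts" []
  let quality := PySem.Str.lower (PySem.Str.strip quality_bar)
  let positive := pvPositiveSignals signals
  let out := pvQualitySection quality
      ++ pvJournalSection target_journal
      ++ pvSignalSection positive (PySem.Set.contains (PySem.Set.ofList ["submission", "top_tier_submission"]) quality)
      ++ pvModeSection selected_mode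
  -- every candidate message is pairwise distinct, so no dedup pass is needed
  if out = [] then ["Follow a structured IMRaD narrative with explicit methods-to-claims traceability."] else out

-- ===== PRECONDITION & SPEC =====
def Spec_derive_reporting_constraints (summary : List (String × List (String × Int))) (target_journal : String) (selected_mode : String) (quality_bar : String) (out : List String) : Prop := out = derive_reporting_constraints_alt summary target_journal selected_mode quality_bar
instance (summary : List (String × List (String × Int))) (target_journal : String) (selected_mode : String) (quality_bar : String) (out : List String) : Decidable (Spec_derive_reporting_constraints summary target_journal selected_mode quality_bar out) := by unfold Spec_derive_reporting_constraints; infer_instance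

-- ===== CLAIM (what is proved, stated in full; the proofs are below) =====
def Claim_equal_derive_reporting_constraints : Prop := ∀ (summary : List (String × List (String × Int))) (target_journal : String) (selected_mode : String) (quality_bar : String), Dom_derive_reporting_constraints summary target_journal selected_mode quality_bar → Spec_derive_reporting_constraints summary target_journal selected_mode quality_bar (derive_reporting_constraints summary target_journal selected_mode quality_bar)

-- ===== LEMMAS AND PROOFS =====

-- one conditional-append step, as append of a conditional segment
theorem pv_appendIf_eq (c : Bool) (l s : List String) :
    pvAppendIf c l s = l ++ (if c then s else []) := by
  unfold pvAppendIf; cases c <;> simp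

-- two consecutive appends under the same condition are one conditional segment
theorem pv_seg_merge (c : Bool) (a b : String) (r : List String) :
    (if c then [a] else []) ++ ((if c then [b] else []) ++ r) = (if c then [a, b] else []) ++ r := by
  cases c <;> simp

-- A's hand-written dedup loop is ordered dedup
theorem pv_dedup_loop (l : List String) :
    l.foldl (fun deduped item => if item ∈ deduped then deduped else deduped ++ [item]) []
      = PySem.List.dedup l := by
  rw [PySem.List.dedup_eq_ofList, PySem.Set.ofList_eq_foldl]
  apply PySem.List.foldl_congr_mem
  intro acc x _
  simp [PySem.Set.add, PySem.Set.contains]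

-- membership in B's positive-key set is A's per-key "signals.get(k, 0) > 0" test
theorem pv_positive_contains (signals : List (String × Int)) (k : String) :
    PySem.Set.contains (pvPositiveSignals signals) k
      = decide (0 < PySem.Dict.getD (PySem.Dict.mk signals) k 0) := by
  unfold pvPositiveSignals
  by_cases h : 0 < PySem.Dict.getD (PySem.Dict.mk signals) k 0
  · have hk : k ∈ signals.map Prod.fst := by
      by_contra hk
      have hc : (PySem.Dict.mk signals).contains k = false := by
        rw [PySem.Dict.contains_eq_decide_mem_keys, PySem.Dict.keys_mk]
        simpa using hk
      rw [PySem.Dict.getD_of_not_contains _ 0 hc] at h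
      omega
    obtain ⟨⟨k', v⟩, hmem, rfl⟩ := List.mem_map.mp hk
    simp [h]
    exact ⟨v, hmem⟩
  · simp [h]

-- the filter-map over the signal table, expanded into conditional segments
theorem pv_filter_map_cons (p : String × String → Bool) (k m : String) (rest : List (String × String)) :
    (((k, m) :: rest).filter p).map Prod.snd
      = (if p (k, m) then [m] else []) ++ ((rest.filter p).map Prod.snd) := by
  by_cases h : p (k, m) <;> simp [h]

-- A's if/elif mode chain appends B's mode section
theorem pv_mode_chain (m : String) (l : List String) :
    (if m == "meta_analysis" then l ++ ["Provide effect-size harmonization and prespecified subgroup analyses."]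
     else if m == "systematic_review_no_meta" then l ++ ["Use structured qualitative synthesis and justify why pooling is inappropriate."]
     else if m == "scoping_review" then l ++ ["Focus on evidence mapping logic and transparent charting framework."]
     else l)
    = l ++ pvModeSection m := by
  unfold pvModeSection
  by_cases h1 : m = "meta_analysis"
  · subst h1; simp [pvModeMessages, PySem.Dict.get?_mk_cons]
  by_cases h2 : m = "systematic_review_no_meta"
  · subst h2; simp [pvModeMessages, PySem.Dict.get?_mk_cons]
  by_cases h3 : m = "scoping_review"
  · subst h3; simp [pvModeMessages, PySem.Dict.get?_mk_cons]
  · simp [pvModeMessages, PySem.Dict.get?, h1, h2, h3, Ne.symm h1, Ne.symm h2, Ne.symm h3]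

-- the empty-list fallback in both shapes
theorem pv_fallback {α : Type} (l s : List α) :
    (if l = [] then l ++ s else l) = (if l = [] then s else l) := by
  split <;> simp_all

-- strings with different first characters differ
theorem pv_ne_of_head (s t : String) (h : s.toList.head? ≠ t.toList.head?) : s ≠ t := by
  intro he; exact h (he ▸ rfl)

-- the journal message starts with 'V'
theorem pv_journal_head (tj : String) :
    ("Verify heading structure and declarations against current author instructions for " ++ tj ++ ".").toList.head? = some 'V' := by
  simp [String.toList_append]

-- a conditional segment prepended to a sublist is a sublist of the full segment prepended
theorem pv_seg_sublist (c : Bool) (s r r' : List String) (h : List.Sublist r r') :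
    List.Sublist ((if c then s else []) ++ r) (s ++ r') := by
  cases c
  · simpa using h.trans (List.sublist_append_right s r')
  · simpa using h.append_left s

-- B's mode section is a sublist of the three mode messages
theorem pv_mode_sublist (m : String) :
    List.Sublist (pvModeSection m) ["Provide effect-size harmonization and prespecified subgroup analyses.",
                        "Use structured qualitative synthesis and justify why pooling is inappropriate.",
                        "Focus on evidence mapping logic and transparent charting framework."] := by
  unfold pvModeSection
  by_cases h1 : m = "meta_analysis"
  · subst h1; simp [pvModeMessages, PySem.Dict.get?_mk_cons]
  by_cases h2 : m = "systematic_review_no_meta"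
  · subst h2; simp [pvModeMessages, PySem.Dict.get?_mk_cons]
  by_cases h3 : m = "scoping_review"
  · subst h3; simp [pvModeMessages, PySem.Dict.get?_mk_cons]
  · simp [pvModeMessages, PySem.Dict.get?, Ne.symm h1, Ne.symm h2, Ne.symm h3]

-- the full candidate-message list (with the journal message for tj in the middle) has no duplicates
set_option maxRecDepth 10000 in
theorem pv_master_nodup (tj : String) :
    (["Write all core sections in full paragraphs; avoid bulletized prose in abstract, introduction, results, and discussion.",
      "Use claim-evidence-implication paragraph flow with quantitative anchors in interpretive sections."]
     ++ (["Avoid template-like repetitive openings; vary sentence starters and transitions across adjacent paragraphs."]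
     ++ (["Verify heading structure and declarations against current author instructions for " ++ tj ++ "."]
     ++ (["State protocol/registration details and deviations in Methods."]
     ++ (["Specify synthesis model and justify random-effects assumptions."]
     ++ (["Report heterogeneity (I2/tau2/Q) and sensitivity analyses."]
     ++ (["Report publication bias assessment (funnel plot/small-study effects) where applicable."]
     ++ (["Report study-level risk-of-bias method and results with a dedicated subsection."]
     ++ (["Report certainty of evidence grading and link to primary outcomes."]
     ++ (["Include funding statement and role-of-funder declaration."]
     ++ ["Provide effect-size harmonization and prespecified subgroup analyses.",
         "Use structured qualitative synthesis and justify why pooling is inappropriate.",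
         "Focus on evidence mapping logic and transparent charting framework."])))))))))).Nodup := by
  show (["Write all core sections in full paragraphs; avoid bulletized prose in abstract, introduction, results, and discussion.",
      "Use claim-evidence-implication paragraph flow with quantitative anchors in interpretive sections.",
      "Avoid template-like repetitive openings; vary sentence starters and transitions across adjacent paragraphs."]
     ++ ("Verify heading structure and declarations against current author instructions for " ++ tj ++ ".")
     :: ["State protocol/registration details and deviations in Methods.",
         "Specify synthesis model and justify random-effects assumptions.",
         "Report heterogeneity (I2/tau2/Q) and sensitivity analyses.",
         "Report publication bias assessment (funnel plot/small-study effects) where applicable.",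
         "Report study-level risk-of-bias method and results with a dedicated subsection.",
         "Report certainty of evidence grading and link to primary outcomes.",
         "Include funding statement and role-of-funder declaration.",
         "Provide effect-size harmonization and prespecified subgroup analyses.",
         "Use structured qualitative synthesis and justify why pooling is inappropriate.",
         "Focus on evidence mapping logic and transparent charting framework."]).Nodup
  rw [List.nodup_middle, List.nodup_cons]
  constructor
  · intro hm
    simp only [List.mem_append, List.mem_cons, List.not_mem_nil, or_false] at hm
    rcases hm with ((h | h | h) | h | h | h | h | h | h | h | h | h | h) <;>
      exact pv_ne_of_head _ _ (by rw [pv_journal_head]; decide) h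
  · decide

-- dedup after the empty-fallback is the identity on a duplicate-free list
theorem pv_dedup_fallback (X : List String) (h : X.Nodup) :
    PySem.List.dedup (if X = [] then ["Follow a structured IMRaD narrative with explicit methods-to-claims traceability."] else X)
      = if X = [] then ["Follow a structured IMRaD narrative with explicit methods-to-claims traceability."] else X := by
  split_ifs with hE
  · rw [PySem.List.dedup_eq_ofList]
    exact PySem.Set.ofList_eq_self_of_nodup _ (List.nodup_singleton _)
  · rw [PySem.List.dedup_eq_ofList]
    exact PySem.Set.ofList_eq_self_of_nodup X h

-- ===== VERDICT (by name: the statement is the Claim_ definition above) =====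
set_option maxHeartbeats 1000000 in
theorem derive_reporting_constraints_spec : Claim_equal_derive_reporting_constraints := by
  intro summary target_journal selected_mode quality_bar _
  unfold Spec_derive_reporting_constraints derive_reporting_constraints derive_reporting_constraints_alt
  simp only [pv_appendIf_eq, pv_mode_chain, pv_dedup_loop, pv_fallback, pv_positive_contains,
    pvQualitySection, pvJournalSection, pvSignalSection, pvSignalMessages,
    pv_filter_map_cons, List.filter_nil, List.map_nil]
  simp only [List.nil_append, List.append_nil, pv_seg_merge, List.append_assoc]
  refine pv_dedup_fallback _ ?_
  refine List.Nodup.sublist ?_ (pv_master_nodup target_journal)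
  exact pv_seg_sublist _ _ _ _ (pv_seg_sublist _ _ _ _ (pv_seg_sublist _ _ _ _
    (pv_seg_sublist _ _ _ _ (pv_seg_sublist _ _ _ _ (pv_seg_sublist _ _ _ _
    (pv_seg_sublist _ _ _ _ (pv_seg_sublist _ _ _ _ (pv_seg_sublist _ _ _ _
    (pv_seg_sublist _ _ _ _ (pv_mode_sublist selected_mode))))))))))
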